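-- pv_equiv track=rewrite | github.com/pypi-data/pypi-mirror-403 | packages/dicompare/dicompare-0.1.45.tar.gz/dicompare-0.1.45/dicompare/io/pro.py | _determine_image_types_for_series
-- ===== SOURCE A (Python) =====
-- from typing import Dict, Any, Optional, Union, List
-- from typing import Optional, List, Callable
--
-- def _determine_image_types_for_series(recon_mode: int, dicom_data: Dict[str, Any]) -> List[List[str]]:
--     """
--     Determine image type variations based on reconstruction mode.
--
--     Args:
--         recon_mode: ucReconstructionMode from .pro file
--         dicom_data: DICOM-compatible data
--
--     Returns:
--         List of ImageType arrays that will be created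
--     """
--     base_image_type = dicom_data.get("ImageType") or ["ORIGINAL", "PRIMARY", "M"]
--
--     if recon_mode == 8:
--         # Magnitude + Phase reconstruction
--         mag_type = [item if item != "P" else "M" for item in base_image_type]
--         phase_type = [item if item != "M" else "P" for item in base_image_type]
--         if "M" not in mag_type:
--             mag_type.append("M")
--         if "P" not in phase_type:
--             phase_type.append("P")
--         return [mag_type, phase_type]
--
--     elif recon_mode == 2:
--         # Phase only
--         phase_type = [item if item != "M" else "P" for item in base_image_type]
--         if "P" not in phase_type:
--             phase_type.append("P")
--         return [phase_type]
--
--     else: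
--         # Magnitude only (mode 1, 4, etc.)
--         mag_type = [item if item != "P" else "M" for item in base_image_type]
--         if "M" not in mag_type:
--             mag_type.append("M")
--         return [mag_type]
-- ===== SOURCE B (Python) =====
-- def _variant(items, target, other, seen=False):
--     # one recursive pass: substitute other->target while tracking whether target
--     # has appeared; the base case supplies the trailing target only if never seen
--     if not items:
--         return [] if seen else [target]
--     x = target if items[0] == other else items[0]
--     return [x] + _variant(items[1:], target, other, seen or x == target)
--
-- def _determine_image_types_for_series(recon_mode, dicom_data):
--     base = dicom_data.get("ImageType") or ["ORIGINAL", "PRIMARY", "M"]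
--     variants = []
--     if recon_mode != 2:            # every mode except phase-only yields a magnitude variant
--         variants.append(_variant(base, "M", "P"))
--     if recon_mode in (2, 8):       # phase-only and mag+phase yield a phase variant
--         variants.append(_variant(base, "P", "M"))
--     return variants
-- ===== Notes on version B (the rewrite author's own statement) =====
-- stated objective: alternative
-- what changed: Replaces the three branches of staged passes (comprehension, then membership scan, then append) by yes/no questions 'does this mode yield a magnitude/phase variant' and a single recursive pass that substitutes while tracking presence, emitting the trailing letter in the base case.
import Mathlib
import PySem

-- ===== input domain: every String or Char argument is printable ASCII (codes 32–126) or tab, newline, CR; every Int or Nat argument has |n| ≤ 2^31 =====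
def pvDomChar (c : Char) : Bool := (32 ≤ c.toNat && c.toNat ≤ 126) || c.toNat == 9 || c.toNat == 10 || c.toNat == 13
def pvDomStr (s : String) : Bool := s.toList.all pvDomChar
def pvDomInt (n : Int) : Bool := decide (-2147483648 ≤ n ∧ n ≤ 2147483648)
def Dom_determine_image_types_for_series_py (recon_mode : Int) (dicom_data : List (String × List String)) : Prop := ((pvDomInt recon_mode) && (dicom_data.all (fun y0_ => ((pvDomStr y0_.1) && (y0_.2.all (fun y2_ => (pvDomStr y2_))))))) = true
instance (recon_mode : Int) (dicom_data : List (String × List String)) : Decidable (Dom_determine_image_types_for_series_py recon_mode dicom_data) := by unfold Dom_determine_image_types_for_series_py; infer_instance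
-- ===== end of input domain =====

-- B asks per mode "does it yield a magnitude / phase variant" and builds each variant in one recursive pass with a seen-flag; objective: alternative decomposition.


-- ===== PORT A =====
-- base_image_type = dicom_data.get("ImageType") or default  (empty list is falsy)
def determine_image_types_for_series_py (recon_mode : Int) (dicom_data : List (String × List String)) : List (List String) :=
  let base_image_type :=
    match (dicom_data.find? (fun kv => kv.1 == "ImageType")).map Prod.snd with
    | some l => if l = [] then ["ORIGINAL", "PRIMARY", "M"] else l
    | none => ["ORIGINAL", "PRIMARY", "M"]
  if recon_mode = 8 then
    let mag_type := base_image_type.map (fun item => if item ≠ "P" then item else "M")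
    let phase_type := base_image_type.map (fun item => if item ≠ "M" then item else "P")
    let mag_type := if "M" ∈ mag_type then mag_type else mag_type ++ ["M"]
    let phase_type := if "P" ∈ phase_type then phase_type else phase_type ++ ["P"]
    [mag_type, phase_type]
  else if recon_mode = 2 then
    let phase_type := base_image_type.map (fun item => if item ≠ "M" then item else "P")
    let phase_type := if "P" ∈ phase_type then phase_type else phase_type ++ ["P"]
    [phase_type]
  else
    let mag_type := base_image_type.map (fun item => if item ≠ "P" then item else "M")
    let mag_type := if "M" ∈ mag_type then mag_type else mag_type ++ ["M"]
    [mag_type]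

-- ===== PORT B =====
-- one recursive pass: substitute other->target tracking whether target has appeared;
-- the base case supplies the trailing target only if it was never seen
def pvVariant (target other : String) : List String → Bool → List String
  | [], seen => if seen then [] else [target]
  | item :: rest, seen =>
    let x := if item = other then target else item
    x :: pvVariant target other rest (seen || x = target)

def determine_image_types_for_series_py_alt (recon_mode : Int) (dicom_data : List (String × List String)) : List (List String) :=
  let base :=
    match (dicom_data.find? (fun kv => kv.1 == "ImageType")).map Prod.snd with
    | some l => if l = [] then ["ORIGINAL", "PRIMARY", "M"] else l
    | none => ["ORIGINAL", "PRIMARY", "M"]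
  (if recon_mode ≠ 2 then [pvVariant "M" "P" base false] else []) ++
  (if recon_mode = 2 ∨ recon_mode = 8 then [pvVariant "P" "M" base false] else [])

-- ===== PRECONDITION & SPEC =====
def Spec_determine_image_types_for_series_py (recon_mode : Int) (dicom_data : List (String × List String)) (out : List (List String)) : Prop := out = determine_image_types_for_series_py_alt recon_mode dicom_data
instance (recon_mode : Int) (dicom_data : List (String × List String)) (out : List (List String)) : Decidable (Spec_determine_image_types_for_series_py recon_mode dicom_data out) := by unfold Spec_determine_image_types_for_series_py; infer_instance

-- ===== CLAIM (what is proved, stated in full; the proofs are below) =====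
def Claim_equal_determine_image_types_for_series_py : Prop := ∀ (recon_mode : Int) (dicom_data : List (String × List String)), Dom_determine_image_types_for_series_py recon_mode dicom_data → Spec_determine_image_types_for_series_py recon_mode dicom_data (determine_image_types_for_series_py recon_mode dicom_data)

-- ===== LEMMAS AND PROOFS =====

-- B's single pass equals A's staged passes (substitute, membership test, append)
theorem pvVariant_eq (target other : String) : ∀ (base : List String) (seen : Bool),
    pvVariant target other base seen =
      (if seen || target ∈ base.map (fun i => if i = other then target else i)
       then base.map (fun i => if i = other then target else i)
       else base.map (fun i => if i = other then target else i) ++ [target]) := by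
  intro base
  induction base with
  | nil => intro seen; cases seen <;> simp [pvVariant]
  | cons item rest ih =>
    intro seen
    simp only [pvVariant, ih, List.map_cons]
    by_cases ho : item = other
    · subst ho; cases seen <;> simp
    · by_cases ht : item = target
      · subst ht; cases seen <;> simp [ho]
      · cases seen <;> simp [ho, ht, Ne.symm ht, apply_ite (List.cons item)]

-- ===== VERDICT (by name: the statement is the Claim_ definition above) =====
theorem determine_image_types_for_series_py_spec : Claim_equal_determine_image_types_for_series_py := by
  intro recon_mode dicom_data _
  unfold Spec_determine_image_types_for_series_py
  unfold determine_image_types_for_series_py determine_image_types_for_series_py_alt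
  simp only [pvVariant_eq, Bool.false_or, decide_eq_true_eq, ite_not]
  by_cases h8 : recon_mode = 8
  · simp [h8]
  · by_cases h2 : recon_mode = 2
    · simp [h2]
    · simp [h8, h2]
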